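-- pv_equiv track=rewrite | github.com/samkennerly/Fidelio | Fidelio_Functions.py | unpacketize
-- ===== SOURCE A (Python) =====
-- def unpacketize(packets):
--     ''' Undo packetize() function '''
--
--     # How much padding was added to the last packet?
--     nPads = packets[-1] % 10
--
--     # Convert each packet to a string of digits
--     packets = [ str(x).zfill(8) for x in packets ]
--
--     # Remove any digits that were actually random
--     if nPads == 8:
--         del packets[-1]
--     else:
--         packets[-1] = packets[-1][0:8-nPads]
--
--     # Prepare to chop each packet into 2-digit numbers
--     def chop_packet(packet):
--
--         steps   = range(0,len(packet),2)
--         pieces  = [ int(packet[n:n+2]) for n in steps ]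
--
--         return pieces
--
--     # Dynamically re-sizing a list is slow, but let's do it anyway
--     digits = []
--     for x in packets:
--         digits += chop_packet(x)
--
--     return digits
-- ===== SOURCE B (Python) =====
-- def unpacketize(packets):
--     ''' Undo packetize() function (recursive chop; last packet handled separately) '''
--     nPads = packets[-1] % 10
--
--     def chop(s):
--         if not s:
--             return []
--         return [int(s[:2])] + chop(s[2:])
--
--     body = [p for x in packets[:-1] for p in chop(str(x).zfill(8))]
--     last = str(packets[-1]).zfill(8)
--     return body + chop('' if nPads == 8 else last[:8 - nPads])
-- ===== Notes on version B (the rewrite author's own statement) =====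
-- stated objective: alternative
-- what changed: B drops A's intermediate mutated list of packet strings and its forward += accumulator: it trims and chops the last packet separately, flattens the other packets' pieces with a single comprehension, and chops a string by structural recursion two characters at a time instead of A's index-range comprehension.
import Mathlib
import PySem

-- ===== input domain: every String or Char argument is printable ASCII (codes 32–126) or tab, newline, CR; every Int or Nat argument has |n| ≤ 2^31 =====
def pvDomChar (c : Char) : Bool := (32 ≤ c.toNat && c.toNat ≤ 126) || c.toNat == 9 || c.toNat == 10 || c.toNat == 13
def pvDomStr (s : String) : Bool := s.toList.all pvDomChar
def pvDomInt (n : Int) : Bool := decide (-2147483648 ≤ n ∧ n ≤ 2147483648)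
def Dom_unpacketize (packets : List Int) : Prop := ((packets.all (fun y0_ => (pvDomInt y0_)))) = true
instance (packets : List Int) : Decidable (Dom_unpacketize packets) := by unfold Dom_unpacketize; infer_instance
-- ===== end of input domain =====

-- B chops by structural recursion two characters at a time and handles the trimmed last packet
-- separately, with no mutated intermediate list of packet strings (objective: alternative).

-- ===== PORT A =====
-- chop_packet: pieces = [ int(packet[n:n+2]) for n in range(0, len(packet), 2) ]
-- (int(...) raises ValueError exactly where ofChars? is none; those inputs are outside Pre_, .getD 0 is never read there)
def chopPacketA (packet : List Char) : List Int :=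
  (PySem.List.pyRange 0 (packet.length : Int) 2).map
    (fun n => (PySem.Int.ofChars? (PySem.List.slice packet (some n) (some (n + 2)))).getD 0)

def unpacketize (packets : List Int) : List Int :=
  -- nPads = packets[-1] % 10  (IndexError on [] is outside Pre_, the default is never read)
  let nPads := PySem.Int.mod (PySem.List.pyGetD packets (-1) 0) 10
  -- packets = [ str(x).zfill(8) for x in packets ]
  let strs := packets.map (fun x => PySem.Chars.zfill (PySem.Int.toChars x) 8)
  -- if nPads == 8: del packets[-1]  else: packets[-1] = packets[-1][0:8-nPads]
  let strs2 :=
    if nPads = 8 then strs.dropLast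
    else strs.dropLast ++ [PySem.List.slice (PySem.List.pyGetD strs (-1) []) (some 0) (some (8 - nPads))]
  -- digits = []; for x in packets: digits += chop_packet(x)
  strs2.foldl (fun digits x => digits ++ chopPacketA x) []

-- ===== PORT B =====
-- chop(s) = [] if s empty else [int(s[:2])] + chop(s[2:])
def chopAlt (s : List Char) : List Int :=
  if h : s.isEmpty then []
  else (PySem.Int.ofChars? (PySem.List.slice s none (some 2))).getD 0
        :: chopAlt (PySem.List.slice s (some 2) none)
termination_by s.length
decreasing_by
  rw [PySem.List.slice_from s (by norm_num)]
  cases s with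
  | nil => simp at h
  | cons a t => simp

def unpacketize_alt (packets : List Int) : List Int :=
  let nPads := PySem.Int.mod (PySem.List.pyGetD packets (-1) 0) 10
  -- body = [p for x in packets[:-1] for p in chop(str(x).zfill(8))]
  let body := (PySem.List.slice packets none (some (-1))).flatMap
    (fun x => chopAlt (PySem.Chars.zfill (PySem.Int.toChars x) 8))
  let lastS := PySem.Chars.zfill (PySem.Int.toChars (PySem.List.pyGetD packets (-1) 0)) 8
  body ++ chopAlt (if nPads = 8 then [] else PySem.List.slice lastS none (some (8 - nPads)))

-- ===== PRECONDITION & SPEC =====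
-- Pre_ excludes exactly the inputs where A raises: the empty list (IndexError on packets[-1]) and a
-- negative last packet with last % 10 == 7, where the trimmed last string is just "-" and int("-")
-- raises ValueError (B raises there too).
def Pre_unpacketize (packets : List Int) : Prop :=
  packets ≠ [] ∧
  ¬(PySem.List.pyGetD packets (-1) 0 < 0 ∧ PySem.Int.mod (PySem.List.pyGetD packets (-1) 0) 10 = 7)
instance (packets : List Int) : Decidable (Pre_unpacketize packets) := by
  unfold Pre_unpacketize; infer_instance

def pvWitness_unpacketize : List Int := [1234567, 30]

def Spec_unpacketize (packets : List Int) (out : List Int) : Prop := out = unpacketize_alt packets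
instance (packets : List Int) (out : List Int) : Decidable (Spec_unpacketize packets out) := by unfold Spec_unpacketize; infer_instance

-- ===== CLAIM (what is proved, stated in full; the proofs are below) =====
def Claim_equal_unpacketize : Prop := ∀ (packets : List Int), Dom_unpacketize packets → Pre_unpacketize packets → Spec_unpacketize packets (unpacketize packets)

-- ===== LEMMAS AND PROOFS =====

-- the common closed form of both chops: the k-th piece reads characters 2k and 2k+1
def chopSpec (s : List Char) : List Int :=
  (List.range ((s.length + 1) / 2)).map
    (fun k => (PySem.Int.ofChars? ((s.drop (2 * k)).take 2)).getD 0)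

lemma chopA_eq_chopSpec (s : List Char) : chopPacketA s = chopSpec s := by
  unfold chopPacketA chopSpec
  rw [PySem.List.pyRange_of_pos 0 (s.length : Int) (by norm_num), List.map_map]
  have hcnt : (if (0:Int) < (s.length : Int) then (((s.length : Int) - 0 + 2 - 1) / 2).toNat else 0)
      = (s.length + 1) / 2 := by
    split <;> omega
  rw [hcnt]
  refine List.map_congr_left ?_
  intro k _
  simp only [Function.comp]
  have h1 : (0:Int) ≤ 0 + 2 * (k : Int) := by positivity
  rw [PySem.List.slice_toNat s h1 (by omega)]
  have h2 : ((0:Int) + 2 * (k : Int)).toNat = 2 * k := by omega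
  have h3 : ((0:Int) + 2 * (k : Int) + 2).toNat = 2 * k + 2 := by omega
  rw [h2, h3]
  simp

lemma chopAlt_eq_chopSpec (s : List Char) : chopAlt s = chopSpec s := by
  have H : ∀ (n : Nat) (s : List Char), s.length ≤ n → chopAlt s = chopSpec s := by
    intro n
    induction n with
    | zero =>
      intro s hs
      have : s = [] := List.eq_nil_of_length_eq_zero (by omega)
      subst this
      rw [chopAlt]
      simp [chopSpec]
    | succ n ih =>
      intro s hs
      rw [chopAlt]
      by_cases h : s.isEmpty
      · have : s = [] := List.isEmpty_iff.mp h
        subst this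
        simp [chopSpec]
      · rw [dif_neg h]
        have hne : s ≠ [] := by simpa [List.isEmpty_iff] using h
        have hlen : 1 ≤ s.length := by
          cases s with
          | nil => simp at hne
          | cons a t => simp
        rw [PySem.List.slice_from s (by norm_num), PySem.List.slice_to s (by norm_num)]
        have h2' : (2:Int).toNat = 2 := rfl
        rw [h2', ih (s.drop 2) (by simp [List.length_drop]; omega)]
        unfold chopSpec
        have hsplit : (s.length + 1) / 2 = ((s.drop 2).length + 1) / 2 + 1 := by
          simp [List.length_drop]; omega
        rw [hsplit, List.range_succ_eq_map, List.map_cons, List.map_map]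
        refine congrArg₂ _ (by simp) ?_
        refine List.map_congr_left ?_
        intro k _
        simp only [Function.comp, Nat.succ_eq_add_one]
        rw [List.drop_drop]
        have : 2 * (k + 1) = 2 + 2 * k := by omega
        rw [this]
  exact H s.length s le_rfl

-- the last element of the mapped list, under any default, is f of the last element
lemma pyGetD_neg_one_map {α β : Type} (f : α → β) (xs : List α) (h : xs ≠ []) (d : β) (d' : α) :
    PySem.List.pyGetD (xs.map f) (-1) d = f (PySem.List.pyGetD xs (-1) d') := by
  have hlen : 1 ≤ xs.length := by
    cases xs with
    | nil => simp at h
    | cons a t => simp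
  simp only [PySem.List.pyGetD]
  rw [PySem.List.pyGet?_neg (xs.map f) (by norm_num) (by simp; omega),
      PySem.List.pyGet?_neg xs (by norm_num) (by omega)]
  simp only [List.length_map, List.getElem?_map]
  have hidx : xs.length - ((-(-1:Int)).toNat) < xs.length := by omega
  rw [List.getElem?_eq_getElem hidx]
  simp

-- ===== VERDICT (by name: the statement is the Claim_ definition above) =====
theorem unpacketize_spec : Claim_equal_unpacketize := by
  intro packets _ hpre
  obtain ⟨hne, -⟩ := hpre
  unfold Spec_unpacketize unpacketize unpacketize_alt
  simp only []
  rw [PySem.List.foldl_append_eq_flatMap, List.nil_append]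
  rw [PySem.List.slice_to_neg_one]
  have hmapLast :
      PySem.List.pyGetD (packets.map (fun x => PySem.Chars.zfill (PySem.Int.toChars x) 8)) (-1) []
        = PySem.Chars.zfill (PySem.Int.toChars (PySem.List.pyGetD packets (-1) 0)) 8 :=
    pyGetD_neg_one_map _ packets hne _ 0
  have hdropMap :
      (packets.map (fun x => PySem.Chars.zfill (PySem.Int.toChars x) 8)).dropLast
        = packets.dropLast.map (fun x => PySem.Chars.zfill (PySem.Int.toChars x) 8) :=
    (List.map_dropLast).symm
  by_cases h8 : PySem.Int.mod (PySem.List.pyGetD packets (-1) 0) 10 = 8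
  · rw [if_pos h8, if_pos h8, hdropMap]
    rw [chopAlt_eq_chopSpec]
    have h0 : chopSpec [] = [] := by simp [chopSpec]
    rw [h0, List.append_nil, List.flatMap_map]
    refine List.flatMap_congr ?_
    intro x _
    rw [chopA_eq_chopSpec, chopAlt_eq_chopSpec]
  · rw [if_neg h8, if_neg h8, hdropMap, hmapLast]
    rw [List.flatMap_append, List.flatMap_map]
    refine congrArg₂ _ ?_ ?_
    · refine List.flatMap_congr ?_
      intro x _
      rw [chopA_eq_chopSpec, chopAlt_eq_chopSpec]
    · simp only [List.flatMap_cons, List.flatMap_nil, List.append_nil]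
      rw [chopA_eq_chopSpec, chopAlt_eq_chopSpec, PySem.List.slice_zero_start]
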